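-- pv_equiv track=rewrite | github.com/AdithyaBharade/MothiBharade_Numerology | app.py | process_number
-- ===== SOURCE A (Python) =====
-- def process_number(num):
--     if len(num) > 10 or not num.isdigit():
--         return "Invalid input. Please enter up to a 10-digit number."
--
--     num = num.zfill(10)
--
--     positions = {
--         '3': (0, 0), '1': (0, 1), '9': (0, 2),
--         '6': (1, 0), '7': (1, 1), '5': (1, 2),
--         '2': (2, 0), '8': (2, 1), '4': (2, 2)
--     }
--
--     matrix = [['' for _ in range(3)] for _ in range(3)]
--
--     for i, digit in enumerate(num):
--         if digit in positions:
--             row, col = positions[digit]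
--             if matrix[row][col]:
--                 matrix[row][col] += digit
--             else:
--                 matrix[row][col] = digit
--         elif digit == '0':
--             for j in range(i - 1, -1, -1):
--                 if num[j] != '0':
--                     row, col = positions[num[j]]
--                     matrix[row][col] += '+'
--                     break
--
--     total = sum(int(digit) for digit in num) - 9
--     while total > 9:
--         total = sum(int(digit) for digit in str(total))
--
--     total_position = positions[str(total)] if str(total) in positions else None
--     if total_position:
--         row, col = total_position
--         if matrix[row][col]:
--             matrix[row][col] += f"({total})"
--         else:
--             matrix[row][col] = f"({total})"
--
--     fixed_width = 8
--     output = "`\n"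
--
--     for i, row in enumerate(matrix):
--         output += " | ".join(matrix[i][j].center(fixed_width) if matrix[i][j] else ' '.center(fixed_width) for j in range(3)) + "\n"
--         if i < 2:
--             output += "-" * (fixed_width * 3 + 6) + "\n"
--     output += f"\nTotal = {total}\n"
--     return output.strip()
-- ===== SOURCE B (Python) =====
-- def process_number(num):
--     if len(num) > 10 or not num.isdigit():
--         return "Invalid input. Please enter up to a 10-digit number."
--
--     num = num.zfill(10)
--
--     # single forward pass: `last` is the most recently seen non-zero digit
--     cells = {}
--     last = None
--     for d in num:
--         if d != '0':
--             cells[d] = cells.get(d, '') + d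
--             last = d
--         elif last is not None:
--             cells[last] = cells.get(last, '') + '+'
--
--     total = sum(int(d) for d in num) - 9
--     if total > 9:
--         total = (total - 1) % 9 + 1  # closed-form digital root
--
--     t = str(total)
--     if len(t) == 1 and t != '0':
--         cells[t] = cells.get(t, '') + f"({total})"
--
--     layout = [['3', '1', '9'], ['6', '7', '5'], ['2', '8', '4']]
--     w = 8
--     lines = ["`"]
--     for r, row in enumerate(layout):
--         lines.append(" | ".join(cells.get(d, '').center(w) if cells.get(d, '') else ' '.center(w) for d in row))
--         if r < 2:
--             lines.append("-" * (w * 3 + 6))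
--     lines.append(f"\nTotal = {total}")
--     return "\n".join(lines).strip()
-- ===== Notes on version B (the rewrite author's own statement) =====
-- stated objective: alternative
-- what changed: Replaces A's nested backward rescan (for each '0', scan all earlier digits again) by a single forward pass that remembers the last non-zero digit, stores cells in a dict keyed by digit instead of a 3x3 index matrix looked up through a positions table, and computes the digital root by the closed form (t-1)%9+1 instead of A's repeated re-sum loop.
import Mathlib
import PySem

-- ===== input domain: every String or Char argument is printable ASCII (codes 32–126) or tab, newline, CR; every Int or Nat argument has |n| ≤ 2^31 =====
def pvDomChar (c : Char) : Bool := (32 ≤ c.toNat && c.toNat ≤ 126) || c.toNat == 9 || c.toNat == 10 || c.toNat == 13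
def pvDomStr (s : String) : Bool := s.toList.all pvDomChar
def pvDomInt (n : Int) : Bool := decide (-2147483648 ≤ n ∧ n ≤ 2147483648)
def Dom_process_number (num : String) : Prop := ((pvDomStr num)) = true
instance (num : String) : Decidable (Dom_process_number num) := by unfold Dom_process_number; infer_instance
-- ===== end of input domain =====

-- B replaces A's quadratic backward rescan for '0' digits by a single forward pass that remembers
-- the last non-zero digit, stores cells in a dict keyed by digit instead of a 3×3 index matrix,
-- and computes the digital root by the closed form (t-1) % 9 + 1 instead of A's re-sum loop.

-- int(c) for a single digit character (exact there; both Pythons only apply int() to digit chars)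
def pvDigInt (c : Char) : Int := (c.toNat : Int) - 48

-- s.center(8): exact port of CPython's str.center for the even width 8 (extra space on the right)
def pvCenter8 (cs : List Char) : List Char :=
  if 8 ≤ cs.length then cs
  else List.replicate ((8 - cs.length) / 2) ' ' ++ cs ++
       List.replicate ((8 - cs.length) - (8 - cs.length) / 2) ' '

-- sum(int(d) for d in s)
def pvSumDigits (cs : List Char) : Int := (cs.map pvDigInt).sum

-- ===== PORT A =====

-- the `positions` dict (a fixed 9-entry literal, looked up only): as a function digit ↦ (row, col)
def pvPosA (d : Char) : Option (Nat × Nat) :=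
  match d with
  | '3' => some (0, 0) | '1' => some (0, 1) | '9' => some (0, 2)
  | '6' => some (1, 0) | '7' => some (1, 1) | '5' => some (1, 2)
  | '2' => some (2, 0) | '8' => some (2, 1) | '4' => some (2, 2)
  | _ => none

def pvMatGet (m : List (List (List Char))) (r c : Nat) : List Char := (m.getD r []).getD c []

def pvMatSet (m : List (List (List Char))) (r c : Nat) (v : List Char) :
    List (List (List Char)) := m.set r ((m.getD r []).set c v)

-- `for j in range(i-1,-1,-1): if num[j] != '0': …; break`
def pvBackA (num : List Char) (j : Int) (m : List (List (List Char))) :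
    List (List (List Char)) :=
  if j < 0 then m
  else
    match PySem.List.pyGet? num j with
    | none => m        -- unreachable: j < len(num) whenever A runs this loop
    | some d =>
      if d ≠ '0' then
        match pvPosA d with
        | some (r, c) => pvMatSet m r c (pvMatGet m r c ++ ['+'])
        | none => m    -- unreachable: num is all digits, d ≠ '0'
      else pvBackA num (j - 1) m
termination_by (j + 1).toNat
decreasing_by omega

-- `for i, digit in enumerate(num): …`
def pvLoopA (num : List Char) : Nat → List Char → List (List (List Char)) →
    List (List (List Char))
  | _, [], m => m
  | i, d :: rest, m =>
    pvLoopA num (i + 1) rest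
      (match pvPosA d with
       | some (r, c) =>
         if pvMatGet m r c ≠ [] then pvMatSet m r c (pvMatGet m r c ++ [d])
         else pvMatSet m r c [d]
       | none => if d = '0' then pvBackA num ((i : Int) - 1) m else m)

-- `while total > 9: total = sum(int(d) for d in str(total))` (fuel only makes it total; 100 ≫ any run)
def pvWhileA : Nat → Int → Int
  | 0, t => t
  | fuel + 1, t => if t > 9 then pvWhileA fuel (pvSumDigits (PySem.Int.toChars t)) else t

-- `positions[str(total)] if str(total) in positions else None`
def pvPosTotA (t : List Char) : Option (Nat × Nat) :=
  match t with
  | [c] => pvPosA c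
  | _ => none

-- one row of the output: `" | ".join(matrix[i][j].center(8) if matrix[i][j] else ' '.center(8) for j in range(3))`
def pvRenderRowA (m : List (List (List Char))) (i : Nat) : List Char :=
  PySem.Chars.join (" | ".toList)
    (([0, 1, 2] : List Nat).map fun j =>
      if pvMatGet m i j ≠ [] then pvCenter8 (pvMatGet m i j) else pvCenter8 [' '])

def process_number (num : String) : String :=
  if 10 < num.toList.length ∨ ¬ PySem.Chars.strIsdigit num.toList then
    "Invalid input. Please enter up to a 10-digit number."
  else
    let cs := PySem.Chars.zfill num.toList 10
    let mat := pvLoopA cs 0 cs [[[], [], []], [[], [], []], [[], [], []]]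
    let total := pvWhileA 100 (pvSumDigits cs - 9)
    let mat :=
      match pvPosTotA (PySem.Int.toChars total) with
      | some (r, c) =>
        let app := '(' :: (PySem.Int.toChars total ++ [')'])
        if pvMatGet mat r c ≠ [] then pvMatSet mat r c (pvMatGet mat r c ++ app)
        else pvMatSet mat r c app
      | none => mat
    let out := ['`', '\n']
    let out := ([0, 1, 2] : List Nat).foldl (fun out i =>
      let out := out ++ pvRenderRowA mat i ++ ['\n']
      if i < 2 then out ++ List.replicate 30 '-' ++ ['\n'] else out) out
    let out := out ++ '\n' :: ("Total = ".toList ++ PySem.Int.toChars total ++ ['\n'])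
    String.ofList (PySem.Chars.strip out)

-- ===== PORT B =====

-- one step of B's single forward pass: state = (cells dict, last non-zero digit seen)
def pvStepB (st : PySem.Dict Char (List Char) × Option Char) (d : Char) :
    PySem.Dict Char (List Char) × Option Char :=
  if d ≠ '0' then (st.1.insert d (st.1.getD d [] ++ [d]), some d)
  else
    match st.2 with
    | some l => (st.1.insert l (st.1.getD l [] ++ ['+']), st.2)
    | none => st

def pvLayoutB : List (List Char) := [['3', '1', '9'], ['6', '7', '5'], ['2', '8', '4']]

-- `" | ".join(cells.get(d,'').center(8) if cells.get(d,'') else ' '.center(8) for d in row)`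
def pvLineB (cells : PySem.Dict Char (List Char)) (row : List Char) : List Char :=
  PySem.Chars.join (" | ".toList)
    (row.map fun d =>
      if cells.getD d [] ≠ [] then pvCenter8 (cells.getD d []) else pvCenter8 [' '])

def process_number_alt (num : String) : String :=
  if 10 < num.toList.length ∨ ¬ PySem.Chars.strIsdigit num.toList then
    "Invalid input. Please enter up to a 10-digit number."
  else
    let cs := PySem.Chars.zfill num.toList 10
    let cells := (cs.foldl pvStepB (PySem.Dict.empty, none)).1
    let t0 := pvSumDigits cs - 9
    let total := if t0 > 9 then PySem.Int.mod (t0 - 1) 9 + 1 else t0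
    let cells :=
      match PySem.Int.toChars total with
      | [c] =>
        if c ≠ '0' then
          cells.insert c (cells.getD c [] ++ ('(' :: (PySem.Int.toChars total ++ [')'])))
        else cells
      | _ => cells
    let lines := (PySem.List.enumerate pvLayoutB).foldl (fun lines ri =>
      let lines := lines ++ [pvLineB cells ri.2]
      if ri.1 < 2 then lines ++ [List.replicate 30 '-'] else lines) [['`']]
    let lines := lines ++ ['\n' :: ("Total = ".toList ++ PySem.Int.toChars total)]
    String.ofList (PySem.Chars.strip (PySem.Chars.join ['\n'] lines))

-- ===== PRECONDITION & SPEC =====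
def Spec_process_number (num : String) (out : String) : Prop := out = process_number_alt num
instance (num : String) (out : String) : Decidable (Spec_process_number num out) := by unfold Spec_process_number; infer_instance

-- ===== CLAIM (what is proved, stated in full; the proofs are below) =====
def Claim_equal_process_number : Prop := ∀ (num : String), Dom_process_number num → Spec_process_number num (process_number num)

-- ===== LEMMAS AND PROOFS =====

-- the matrix A maintains, expressed through B's cell dict
def pvMatOf (cells : PySem.Dict Char (List Char)) : List (List (List Char)) :=
  [[cells.getD '3' [], cells.getD '1' [], cells.getD '9' []],
   [cells.getD '6' [], cells.getD '7' [], cells.getD '5' []],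
   [cells.getD '2' [], cells.getD '8' [], cells.getD '4' []]]

-- last non-zero digit of a prefix (what B's `last` variable holds)
def pvLastNZ (p : List Char) : Option Char := (p.filter (· ≠ '0')).getLast?

lemma pv_digit_cases (d : Char) (h : PySem.Chars.isdigit d = true) :
  d = '0' ∨ d = '1' ∨ d = '2' ∨ d = '3' ∨ d = '4' ∨ d = '5' ∨ d = '6' ∨ d = '7' ∨ d = '8' ∨ d = '9' := by
  simp [PySem.Chars.isdigit, Char.le_def] at h
  obtain ⟨h1, h2⟩ := h
  have hv : 48 ≤ d.val.toNat ∧ d.val.toNat ≤ 57 := by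
    constructor <;> simpa [UInt32.le_iff_toNat_le] using ‹_›
  obtain ⟨ha, hb⟩ := hv
  have he : Char.ofNat d.toNat = d := Char.ofNat_toNat d
  unfold Char.toNat at he
  interval_cases h : d.val.toNat <;> subst he <;> simp
lemma pv_matGet_pos (cells : PySem.Dict Char (List Char)) (d : Char) (r c : Nat)
    (h : pvPosA d = some (r, c)) : pvMatGet (pvMatOf cells) r c = cells.getD d [] := by
  unfold pvPosA at h
  split at h <;> simp only [Option.some.injEq, Prod.mk.injEq, reduceCtorEq] at h <;>
    obtain ⟨hr, hc⟩ := h <;> subst hr <;> subst hc <;> rfl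

lemma pv_matSet_pos (cells : PySem.Dict Char (List Char)) (d : Char) (r c : Nat) (v : List Char)
    (h : pvPosA d = some (r, c)) : pvMatSet (pvMatOf cells) r c v = pvMatOf (cells.insert d v) := by
  unfold pvPosA at h
  split at h <;> simp only [Option.some.injEq, Prod.mk.injEq, reduceCtorEq] at h <;>
    obtain ⟨hr, hc⟩ := h <;> subst hr <;> subst hc <;>
    simp [pvMatSet, pvMatOf, PySem.Dict.getD_insert]
-- what one run of A's backward scan does, phrased through the last non-zero digit
def pvPlus (l? : Option Char) (m : List (List (List Char))) : List (List (List Char)) :=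
  match l? with
  | some l =>
    match pvPosA l with
    | some (r, c) => pvMatSet m r c (pvMatGet m r c ++ ['+'])
    | none => m
  | none => m

lemma pvLastNZ_concat_ne (q : List Char) (c : Char) (h : ¬ c = '0') :
    pvLastNZ (q ++ [c]) = some c := by
  simp [pvLastNZ, List.filter_append, h]

lemma pvLastNZ_concat_zero (q : List Char) : pvLastNZ (q ++ ['0']) = pvLastNZ q := by
  simp [pvLastNZ, List.filter_append]

lemma pv_backA_spec : ∀ (p rest : List Char) (m : List (List (List Char))),
    pvBackA (p ++ rest) ((p.length : Int) - 1) m = pvPlus (pvLastNZ p) m := by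
  intro p
  induction p using List.reverseRecOn with
  | nil => intro rest m; rw [pvBackA]; simp [pvPlus, pvLastNZ]
  | append_singleton q c ih =>
    intro rest m
    rw [pvBackA]
    have h1 : ¬ ((((q ++ [c]).length : Int) - 1) < 0) := by
      simp only [List.length_append, List.length_cons, List.length_nil]; omega
    have h2 : PySem.List.pyGet? ((q ++ [c]) ++ rest) (((q ++ [c]).length : Int) - 1) = some c := by
      have : (((q ++ [c]).length : Int) - 1) = ((q.length : Nat) : Int) := by simp
      rw [this, PySem.List.pyGet?_natCast]
      simp
    rw [if_neg h1, h2]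
    dsimp only
    by_cases hc : c = '0'
    · subst hc
      simp only [if_neg (by simp : ¬ ('0' : Char) ≠ '0')]
      have ha : (q ++ ['0']) ++ rest = q ++ (['0'] ++ rest) := by simp
      have hl : (((q ++ ['0']).length : Int) - 1) - 1 = ((q.length : Int) - 1) := by
        simp only [List.length_append, List.length_cons, List.length_nil]; omega
      rw [ha, hl, ih (['0'] ++ rest) m, pvLastNZ_concat_zero]
    · rw [if_pos (by simpa using hc), pvLastNZ_concat_ne q c hc]
      rfl
lemma pv_posA_some (d : Char) (hd : PySem.Chars.isdigit d = true) (h0 : ¬ d = '0') :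
    ∃ r c, pvPosA d = some (r, c) := by
  rcases pv_digit_cases d hd with h|h|h|h|h|h|h|h|h|h <;> subst h <;>
    first | exact absurd rfl h0 | exact ⟨_, _, rfl⟩

lemma pvLastNZ_mem (p : List Char) (l : Char) (h : pvLastNZ p = some l) :
    l ∈ p ∧ ¬ l = '0' := by
  unfold pvLastNZ at h
  have hm : l ∈ p.filter (· ≠ '0') := List.mem_of_getLast? h
  simpa using List.mem_filter.mp hm

lemma pv_loop_spec : ∀ (rest p : List Char) (cells : PySem.Dict Char (List Char)),
    (∀ c ∈ p, PySem.Chars.isdigit c = true) → (∀ c ∈ rest, PySem.Chars.isdigit c = true) →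
    pvLoopA (p ++ rest) p.length rest (pvMatOf cells) =
      pvMatOf (rest.foldl pvStepB (cells, pvLastNZ p)).1 := by
  intro rest
  induction rest with
  | nil => intro p cells _ _; rfl
  | cons d rest' ih =>
    intro p cells hp hr
    have hd : PySem.Chars.isdigit d = true := hr d (by simp)
    have hp' : ∀ c ∈ p ++ [d], PySem.Chars.isdigit c = true := by
      intro c hc; rcases List.mem_append.mp hc with h | h
      · exact hp c h
      · simpa using (List.mem_singleton.mp h) ▸ hd
    have hr' : ∀ c ∈ rest', PySem.Chars.isdigit c = true := fun c hc => hr c (by simp [hc])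
    have hassoc : p ++ d :: rest' = (p ++ [d]) ++ rest' := by simp
    have hlen : p.length + 1 = (p ++ [d]).length := by simp
    rw [pvLoopA]
    by_cases h0 : d = '0'
    · subst h0
      have hposA : pvPosA '0' = none := rfl
      rw [hposA]
      dsimp only
      rw [if_pos rfl]
      have hback : pvBackA (p ++ '0' :: rest') (((p.length : Nat) : Int) - 1) (pvMatOf cells)
          = pvPlus (pvLastNZ p) (pvMatOf cells) := pv_backA_spec p ('0' :: rest') (pvMatOf cells)
      rw [hback]
      cases hl : pvLastNZ p with
      | none =>
        have : pvPlus none (pvMatOf cells) = pvMatOf cells := rfl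
        rw [this, hassoc, hlen, ih (p ++ ['0']) cells hp' hr', pvLastNZ_concat_zero, hl]
        rfl
      | some l =>
        obtain ⟨hlm, hl0⟩ := pvLastNZ_mem p l hl
        obtain ⟨r, c, hpos⟩ := pv_posA_some l (hp l hlm) hl0
        have : pvPlus (some l) (pvMatOf cells) =
            pvMatOf (cells.insert l (cells.getD l [] ++ ['+'])) := by
          unfold pvPlus
          dsimp only
          rw [hpos]
          dsimp only
          rw [pv_matGet_pos cells l r c hpos, pv_matSet_pos cells l r c _ hpos]
        rw [this, hassoc, hlen, ih (p ++ ['0']) _ hp' hr', pvLastNZ_concat_zero, hl]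
        rw [List.foldl_cons]
        have hstep : pvStepB (cells, some l) '0' =
            (cells.insert l (cells.getD l [] ++ ['+']), some l) := rfl
        rw [hstep]
    · obtain ⟨r, c, hpos⟩ := pv_posA_some d hd h0
      rw [hpos]
      dsimp only
      rw [pv_matGet_pos cells d r c hpos]
      have hupd : (if cells.getD d [] ≠ [] then pvMatSet (pvMatOf cells) r c (cells.getD d [] ++ [d])
          else pvMatSet (pvMatOf cells) r c [d]) = pvMatOf (cells.insert d (cells.getD d [] ++ [d])) := by
        by_cases he : cells.getD d [] = []
        · rw [if_neg (by simp [he]), he]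
          simpa [he] using pv_matSet_pos cells d r c [d] hpos
        · rw [if_pos he, pv_matSet_pos cells d r c _ hpos]
      rw [hupd, hassoc, hlen, ih (p ++ [d]) _ hp' hr', pvLastNZ_concat_ne p d h0]
      have hstep : pvStepB (cells, pvLastNZ p) d =
          (cells.insert d (cells.getD d [] ++ [d]), some d) := by
        unfold pvStepB; rw [if_pos (by simpa using h0)]
      rw [List.foldl_cons, hstep]
lemma pv_digInt_bounds (c : Char) (h : PySem.Chars.isdigit c = true) :
    0 ≤ pvDigInt c ∧ pvDigInt c ≤ 9 := by
  rcases pv_digit_cases c h with h|h|h|h|h|h|h|h|h|h <;> subst h <;> exact ⟨by decide, by decide⟩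

lemma pv_sum_bounds : ∀ (cs : List Char), (∀ c ∈ cs, PySem.Chars.isdigit c = true) →
    0 ≤ pvSumDigits cs ∧ pvSumDigits cs ≤ 9 * cs.length := by
  intro cs
  induction cs with
  | nil => intro _; simp [pvSumDigits]
  | cons c t ih =>
    intro h
    obtain ⟨h1, h2⟩ := pv_digInt_bounds c (h c (by simp))
    obtain ⟨h3, h4⟩ := ih (fun x hx => h x (by simp [hx]))
    unfold pvSumDigits at *
    simp only [List.map_cons, List.sum_cons, List.length_cons]
    constructor <;> [omega; (push_cast; omega)]

lemma pv_while_eq : ∀ n : Nat, n ≤ 90 → pvWhileA 100 ((n : Int) - 9) =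
    (if ((n : Int) - 9) > 9 then PySem.Int.mod ((n : Int) - 9 - 1) 9 + 1 else ((n : Int) - 9)) := by
  decide
lemma pv_zfill_digits (cs : List Char) (h : ∀ c ∈ cs, PySem.Chars.isdigit c = true) :
    ∀ c ∈ PySem.Chars.zfill cs 10, PySem.Chars.isdigit c = true := by
  intro c hc
  unfold PySem.Chars.zfill at hc
  split at hc
  · exact h c hc
  · split at hc
    · split at hc
      · rcases List.mem_cons.mp hc with h1 | h1
        · exact h1 ▸ h _ (by simp)
        · rcases List.mem_append.mp h1 with h2 | h2
          · rw [List.eq_of_mem_replicate h2]; decide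
          · exact h _ (by simp [h2])
      · rcases List.mem_append.mp hc with h2 | h2
        · rw [List.eq_of_mem_replicate h2]; decide
        · exact h _ h2
    · rw [List.eq_of_mem_replicate hc]; decide

lemma pv_place_digit (cells : PySem.Dict Char (List Char)) (d : Char) (r c : Nat)
    (hpos : pvPosA d = some (r, c)) (app : List Char) :
    (if pvMatGet (pvMatOf cells) r c ≠ [] then
       pvMatSet (pvMatOf cells) r c (pvMatGet (pvMatOf cells) r c ++ app)
     else pvMatSet (pvMatOf cells) r c app)
    = pvMatOf (cells.insert d (cells.getD d [] ++ app)) := by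
  rw [pv_matGet_pos cells d r c hpos]
  by_cases he : cells.getD d [] = []
  · rw [if_neg (by simp [he]), he, List.nil_append]
    exact pv_matSet_pos cells d r c app hpos
  · rw [if_pos he]
    exact pv_matSet_pos cells d r c _ hpos

lemma pv_place_eq (cells : PySem.Dict Char (List Char)) (total : Int)
    (h1 : -9 ≤ total) (h2 : total ≤ 9) :
    (match pvPosTotA (PySem.Int.toChars total) with
     | some (r, c) =>
       if pvMatGet (pvMatOf cells) r c ≠ [] then
         pvMatSet (pvMatOf cells) r c
           (pvMatGet (pvMatOf cells) r c ++ ('(' :: (PySem.Int.toChars total ++ [')'])))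
       else pvMatSet (pvMatOf cells) r c ('(' :: (PySem.Int.toChars total ++ [')']))
     | none => pvMatOf cells)
    = pvMatOf
      (match PySem.Int.toChars total with
       | [c] =>
         if c ≠ '0' then
           cells.insert c (cells.getD c [] ++ ('(' :: (PySem.Int.toChars total ++ [')'])))
         else cells
       | _ => cells) := by
  interval_cases total
  all_goals try rfl
  · exact pv_place_digit cells '1' 0 1 rfl _
  · exact pv_place_digit cells '2' 2 0 rfl _
  · exact pv_place_digit cells '3' 0 0 rfl _
  · exact pv_place_digit cells '4' 2 2 rfl _
  · exact pv_place_digit cells '5' 1 2 rfl _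
  · exact pv_place_digit cells '6' 1 0 rfl _
  · exact pv_place_digit cells '7' 1 1 rfl _
  · exact pv_place_digit cells '8' 2 1 rfl _
  · exact pv_place_digit cells '9' 0 2 rfl _
lemma pv_strip_concat_nl (ys : List Char) (h : ys.head? = some '`') :
    PySem.Chars.strip (ys ++ ['\n']) = PySem.Chars.strip ys := by
  cases ys with
  | nil => simp at h
  | cons a t =>
    have ha : a = '`' := by simpa using h
    subst ha
    simp [PySem.Chars.strip, PySem.Chars.lstrip, PySem.Chars.rstrip,
      List.reverse_append, (by decide : PySem.Chars.isspace '`' = false),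
      (by decide : PySem.Chars.isspace '\n' = true)]
lemma pv_render_eq (cells : PySem.Dict Char (List Char)) (t : Int) :
    PySem.Chars.strip
      ((([0, 1, 2] : List Nat).foldl (fun out i =>
          let out := out ++ pvRenderRowA (pvMatOf cells) i ++ ['\n']
          if i < 2 then out ++ List.replicate 30 '-' ++ ['\n'] else out) ['`', '\n'])
        ++ '\n' :: ("Total = ".toList ++ PySem.Int.toChars t ++ ['\n']))
    = PySem.Chars.strip (PySem.Chars.join ['\n']
        (((PySem.List.enumerate pvLayoutB).foldl (fun lines ri =>
            let lines := lines ++ [pvLineB cells ri.2]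
            if ri.1 < 2 then lines ++ [List.replicate 30 '-'] else lines) [['`']])
          ++ ['\n' :: ("Total = ".toList ++ PySem.Int.toChars t)])) := by
  have hrow0 : pvRenderRowA (pvMatOf cells) 0 = pvLineB cells ['3', '1', '9'] := rfl
  have hrow1 : pvRenderRowA (pvMatOf cells) 1 = pvLineB cells ['6', '7', '5'] := rfl
  have hrow2 : pvRenderRowA (pvMatOf cells) 2 = pvLineB cells ['2', '8', '4'] := rfl
  have henum : PySem.List.enumerate pvLayoutB =
      [((0 : Int), ['3', '1', '9']), (1, ['6', '7', '5']), (2, ['2', '8', '4'])] := rfl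
  rw [henum]
  simp only [List.foldl_cons, List.foldl_nil, hrow0, hrow1, hrow2]
  norm_num
  have hj : ∀ (a b c d e f g : List Char), PySem.Chars.join ['\n'] [a, b, c, d, e, f, g] =
      a ++ '\n' :: (b ++ '\n' :: (c ++ '\n' :: (d ++ '\n' :: (e ++ '\n' :: (f ++ '\n' :: g))))) := by
    intros; simp [PySem.Chars.join, List.intercalate]
  rw [hj]
  rw [show ('`' :: '\n' ::
        (pvLineB cells ['3', '1', '9'] ++ '\n' :: (List.replicate 30 '-' ++ '\n' ::
          (pvLineB cells ['6', '7', '5'] ++ '\n' :: (List.replicate 30 '-' ++ '\n' ::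
            (pvLineB cells ['2', '8', '4'] ++ '\n' :: '\n' ::
              ("Total = ".toList ++ (PySem.Int.toChars t ++ ['\n']))))))) : List Char)
      = (['`'] ++ '\n' :: (pvLineB cells ['3', '1', '9'] ++ '\n' :: (List.replicate 30 '-' ++ '\n' ::
          (pvLineB cells ['6', '7', '5'] ++ '\n' :: (List.replicate 30 '-' ++ '\n' ::
            (pvLineB cells ['2', '8', '4'] ++ '\n' ::
              ('\n' :: ("Total = ".toList ++ PySem.Int.toChars t)))))))) ++ ['\n']
      from by simp]
  rw [pv_strip_concat_nl _ (by rfl)]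
-- ===== VERDICT (by name: the statement is the Claim_ definition above) =====
theorem process_number_spec : Claim_equal_process_number := by
  unfold Claim_equal_process_number Spec_process_number
  intro num _

  unfold process_number process_number_alt
  by_cases hcond : 10 < num.toList.length ∨ ¬ PySem.Chars.strIsdigit num.toList
  · rw [if_pos hcond, if_pos hcond]
  · rw [if_neg hcond, if_neg hcond]
    dsimp only
    push Not at hcond
    obtain ⟨hlen, hdig⟩ := hcond
    have hdig' : ∀ c ∈ num.toList, PySem.Chars.isdigit c = true := by
      simp [PySem.Chars.strIsdigit, List.all_eq_true] at hdig
      exact hdig.2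
    have hall : ∀ c ∈ PySem.Chars.zfill num.toList 10, PySem.Chars.isdigit c = true :=
      pv_zfill_digits num.toList hdig'
    have hlen10 : (PySem.Chars.zfill num.toList 10).length = 10 := by
      rw [PySem.Chars.length_zfill]; omega
    set cs := PySem.Chars.zfill num.toList 10 with hcs
    -- the main loop
    have hloop := pv_loop_spec cs [] PySem.Dict.empty (by simp) hall
    simp only [List.nil_append, List.length_nil] at hloop
    have hNZnil : pvLastNZ [] = none := rfl
    rw [hNZnil] at hloop
    have hinit : ([[[], [], []], [[], [], []], [[], [], []]] : List (List (List Char)))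
        = pvMatOf PySem.Dict.empty := rfl
    rw [hinit, hloop]
    -- the total
    obtain ⟨hs0, hs9⟩ := pv_sum_bounds cs hall
    rw [hlen10] at hs9
    have hsn : ((pvSumDigits cs).toNat : Int) = pvSumDigits cs := Int.toNat_of_nonneg hs0
    have hwhile := pv_while_eq (pvSumDigits cs).toNat (by omega)
    rw [hsn] at hwhile
    rw [hwhile]
    set total := (if pvSumDigits cs - 9 > 9 then PySem.Int.mod (pvSumDigits cs - 9 - 1) 9 + 1
      else pvSumDigits cs - 9) with htot
    have htb : -9 ≤ total ∧ total ≤ 9 := by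
      rw [htot]
      split
      · have m1 := PySem.Int.mod_nonneg (pvSumDigits cs - 9 - 1) (b := 9) (by norm_num)
        have m2 := PySem.Int.mod_lt (pvSumDigits cs - 9 - 1) (b := 9) (by norm_num)
        omega
      · omega
    -- the total placement
    rw [pv_place_eq _ total htb.1 htb.2]
    -- the rendering
    exact congrArg String.ofList (pv_render_eq _ total)
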